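-- pv_equiv track=rewrite | github.com/AuralAlchemy/MIDI_Generator_Aural_Alchemy_Streamlit | app.py | _enforce_register
-- ===== SOURCE A (Python) =====
-- from typing import List, Optional, Dict, Tuple
--
-- BASS_MIN_MIDI = 40     # bass must not be below this
--
-- BASS_MAX_MIDI = 52     # bass should not be above this (we pull down if safe)
--
-- NOTE_MIN_MIDI = 40     # absolute floor for ANY note (hard ban below this)
--
-- NOTE_MAX_MIDI = 88     # soft ceiling (keeps voicings from flying too high)
--
-- MAX_OCTAVE_SHIFTS = 6  # safety cap so we never loop forever
--
-- def _shift_octaves(notes: List[int], octs: int) -> List[int]: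
--     return [int(n + 12 * octs) for n in notes]
--
-- def _enforce_register(notes: List[int]) -> List[int]:
--     """
--     Hard guarantees:
--     1) No note below NOTE_MIN_MIDI, ever.
--     2) Bass (min note) forced into BASS_MIN_MIDI..BASS_MAX_MIDI using whole-chord octave shifts.
--     3) Keep top under NOTE_MAX_MIDI when possible.
--     """
--     if not notes:
--         return []
--
--     v = sorted(set(int(n) for n in notes))
--
--     # 1) Absolute floor. Push up by octaves until safe.
--     for _ in range(MAX_OCTAVE_SHIFTS):
--         if min(v) >= NOTE_MIN_MIDI:
--             break
--         v = sorted(set(_shift_octaves(v, +1)))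
--
--     # If still below floor after cap, hard clamp by pushing all offending notes up
--     if min(v) < NOTE_MIN_MIDI:
--         fixed = []
--         for n in v:
--             while n < NOTE_MIN_MIDI:
--                 n += 12
--             fixed.append(n)
--         v = sorted(set(fixed))
--
--     # 2) Force bass into requested window by shifting whole chord.
--     for _ in range(MAX_OCTAVE_SHIFTS):
--         if min(v) >= BASS_MIN_MIDI:
--             break
--         v = sorted(set(_shift_octaves(v, +1)))
--
--     for _ in range(MAX_OCTAVE_SHIFTS):
--         if min(v) <= BASS_MAX_MIDI:
--             break
--         candidate = sorted(set(_shift_octaves(v, -1)))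
--         if min(candidate) >= NOTE_MIN_MIDI:
--             v = candidate
--         else:
--             break
--
--     # 3) Ceiling control.
--     for _ in range(MAX_OCTAVE_SHIFTS):
--         if max(v) <= NOTE_MAX_MIDI:
--             break
--         candidate = sorted(set(_shift_octaves(v, -1)))
--         if min(candidate) < NOTE_MIN_MIDI:
--             break
--         v = candidate
--
--     # Final hard floor re-check
--     for _ in range(MAX_OCTAVE_SHIFTS):
--         if min(v) >= NOTE_MIN_MIDI:
--             break
--         v = sorted(set(_shift_octaves(v, +1)))
--
--     if min(v) < NOTE_MIN_MIDI:
--         fixed = []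
--         for n in v:
--             while n < NOTE_MIN_MIDI:
--                 n += 12
--             fixed.append(n)
--         v = sorted(set(fixed))
--
--     return v
-- ===== SOURCE B (Python) =====
-- BASS_MIN_MIDI = 40
-- BASS_MAX_MIDI = 52
-- NOTE_MIN_MIDI = 40
-- NOTE_MAX_MIDI = 88
-- MAX_OCTAVE_SHIFTS = 6
--
-- def _enforce_register(notes):
--     # Arithmetic re-implementation: each capped octave-shift pass of the original
--     # is replaced by one ceil/floor-division shift count; the bass-min pass is
--     # omitted because BASS_MIN_MIDI == NOTE_MIN_MIDI makes it a no-op.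
--     if not notes:
--         return []
--     v = sorted(set(int(n) for n in notes))
--     lo = v[0]
--     # floor pass: push up by octaves, capped
--     k = min((NOTE_MIN_MIDI - lo + 11) // 12, MAX_OCTAVE_SHIFTS) if lo < NOTE_MIN_MIDI else 0
--     v = [n + 12 * k for n in v]
--     # hard per-note clamp if the cap was not enough
--     if v[0] < NOTE_MIN_MIDI:
--         v = sorted(set(n + 12 * ((NOTE_MIN_MIDI - n + 11) // 12) if n < NOTE_MIN_MIDI else n
--                        for n in v))
--     lo, hi = v[0], v[-1]
--     # bass-ceiling pass: pull down while min > BASS_MAX_MIDI, capped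
--     d = min((lo - BASS_MAX_MIDI - 1) // 12 + 1, MAX_OCTAVE_SHIFTS) if lo > BASS_MAX_MIDI else 0
--     v = [n - 12 * d for n in v]
--     lo -= 12 * d
--     hi -= 12 * d
--     # ceiling pass: pull down while max > NOTE_MAX_MIDI and min stays >= floor, capped
--     c = min((hi - NOTE_MAX_MIDI - 1) // 12 + 1,
--             (lo - NOTE_MIN_MIDI) // 12,
--             MAX_OCTAVE_SHIFTS) if hi > NOTE_MAX_MIDI else 0
--     return [n - 12 * c for n in v]
-- ===== Notes on version B (the rewrite author's own statement) =====
-- stated objective: simpler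
-- what changed: Each capped octave-shift loop (and the per-note while-bump clamp) is replaced by a single arithmetically computed shift count via ceil/floor division applied in one map, and the two passes that are provably no-ops (bass floor equals note floor) are dropped.
import Mathlib
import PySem

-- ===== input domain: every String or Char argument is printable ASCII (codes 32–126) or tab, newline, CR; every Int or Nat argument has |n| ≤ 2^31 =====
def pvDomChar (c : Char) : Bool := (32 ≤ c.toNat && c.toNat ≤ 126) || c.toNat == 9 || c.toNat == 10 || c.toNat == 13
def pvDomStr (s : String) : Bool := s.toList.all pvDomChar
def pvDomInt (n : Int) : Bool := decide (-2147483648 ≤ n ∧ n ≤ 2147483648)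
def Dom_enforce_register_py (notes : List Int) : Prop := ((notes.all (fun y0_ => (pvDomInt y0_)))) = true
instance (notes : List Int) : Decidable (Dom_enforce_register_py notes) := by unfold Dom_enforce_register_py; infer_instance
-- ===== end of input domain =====

-- B replaces each capped octave-shift loop of A by one arithmetically computed whole-chord shift
-- (ceil/floor division), dropping the two passes that are provably no-ops; same return value.

-- ===== PORT A =====
-- sorted(set(xs)) — used by both Pythons
def pvSortedSet (xs : List Int) : List Int :=
  PySem.List.sorted (PySem.Set.ofList xs) (fun x => x)

-- _shift_octaves(notes, octs)
def pvShiftOctaves (notes : List Int) (octs : Int) : List Int :=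
  notes.map (fun n => n + 12 * octs)

-- min(v) / max(v): every call site has v nonempty (notes ≠ [] is checked first), so .getD 0 is exact
def pvMin (v : List Int) : Int := (PySem.List.min? v (fun x => x)).getD 0
def pvMax (v : List Int) : Int := (PySem.List.max? v (fun x => x)).getD 0

-- `for _ in range(f): if min(v) >= 40: break; v = sorted(set(_shift_octaves(v, +1)))`
def pvLoopUpA : Nat → List Int → List Int
  | 0, v => v
  | f+1, v => if 40 ≤ pvMin v then v else pvLoopUpA f (pvSortedSet (pvShiftOctaves v 1))

-- `while n < NOTE_MIN_MIDI: n += 12`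
def pvBumpA (n : Int) : Int :=
  if _h : n < 40 then pvBumpA (n + 12) else n
termination_by (40 - n).toNat
decreasing_by omega

-- the hard-clamp block: bump every offending note, then sorted(set(...))
def pvClampA (v : List Int) : List Int := pvSortedSet (v.map pvBumpA)

-- the bass pull-down loop (break if the candidate would dip below the floor)
def pvLoopDownBassA : Nat → List Int → List Int
  | 0, v => v
  | f+1, v =>
    if pvMin v ≤ 52 then v
    else
      let candidate := pvSortedSet (pvShiftOctaves v (-1))
      if 40 ≤ pvMin candidate then pvLoopDownBassA f candidate else v

-- the ceiling loop
def pvLoopCeilA : Nat → List Int → List Int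
  | 0, v => v
  | f+1, v =>
    if pvMax v ≤ 88 then v
    else
      let candidate := pvSortedSet (pvShiftOctaves v (-1))
      if pvMin candidate < 40 then v else pvLoopCeilA f candidate

def enforce_register_py (notes : List Int) : List Int :=
  if notes = [] then []
  else
    let v1 := pvLoopUpA 6 (pvSortedSet notes)
    let v2 := if pvMin v1 < 40 then pvClampA v1 else v1
    let v3 := pvLoopUpA 6 v2
    let v4 := pvLoopDownBassA 6 v3
    let v5 := pvLoopCeilA 6 v4
    let v6 := pvLoopUpA 6 v5
    if pvMin v6 < 40 then pvClampA v6 else v6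

-- ===== PORT B =====
-- arithmetic per-note bump: n + 12*ceil((40-n)/12) for n below the floor
def pvBumpB (n : Int) : Int :=
  if n < 40 then n + 12 * PySem.Int.floordiv (40 - n + 11) 12 else n

-- v[0] / v[-1]: v nonempty at every call site, so .getD 0 is exact
def enforce_register_py_alt (notes : List Int) : List Int :=
  if notes = [] then []
  else
    let v0 := pvSortedSet notes
    let lo0 := (PySem.List.pyGet? v0 0).getD 0
    let k := if lo0 < 40 then min (PySem.Int.floordiv (40 - lo0 + 11) 12) 6 else 0
    let v1 := v0.map (fun n => n + 12 * k)
    let v2 := if (PySem.List.pyGet? v1 0).getD 0 < 40 then pvSortedSet (v1.map pvBumpB) else v1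
    let lo := (PySem.List.pyGet? v2 0).getD 0
    let hi := (PySem.List.pyGet? v2 (-1)).getD 0
    let d := if 52 < lo then min (PySem.Int.floordiv (lo - 53) 12 + 1) 6 else 0
    let v3 := v2.map (fun n => n - 12 * d)
    let lo2 := lo - 12 * d
    let hi2 := hi - 12 * d
    let c := if 88 < hi2 then
        min (min (PySem.Int.floordiv (hi2 - 89) 12 + 1) (PySem.Int.floordiv (lo2 - 40) 12)) 6
      else 0
    v3.map (fun n => n - 12 * c)

-- ===== PRECONDITION & SPEC =====
def Spec_enforce_register_py (notes : List Int) (out : List Int) : Prop := out = enforce_register_py_alt notes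
instance (notes : List Int) (out : List Int) : Decidable (Spec_enforce_register_py notes out) := by unfold Spec_enforce_register_py; infer_instance

-- ===== CLAIM (what is proved, stated in full; the proofs are below) =====
def Claim_equal_enforce_register_py : Prop := ∀ (notes : List Int), Dom_enforce_register_py notes → Spec_enforce_register_py notes (enforce_register_py notes)

-- ===== LEMMAS AND PROOFS =====

-- last element of v, with default 0 (exact on nonempty lists)
def pvLast (v : List Int) : Int := v.getLast?.getD 0

-- closed-form shift counts of A's three capped loops (12·amount is the total shift applied)
def pvUpAmt (f : Nat) (x : Int) : Int :=
  if x < 40 then min ((40 - x + 11) / 12) (f : Int) else 0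
def pvDownAmt (f : Nat) (x : Int) : Int :=
  if 52 < x then -(min ((x - 53) / 12 + 1) (f : Int)) else 0
def pvCeilAmt (f : Nat) (x z : Int) : Int :=
  if 88 < z then -(min (min ((z - 89) / 12 + 1) ((x - 40) / 12)) (f : Int)) else 0

theorem pv_fd12 (a : Int) : PySem.Int.floordiv a 12 = a / 12 :=
  PySem.Int.floordiv_eq_ediv_of_pos (by norm_num)

theorem pv_pairwise_map (v : List Int) (c : Int) (h : v.Pairwise (· < ·)) :
    (v.map (fun n => n + c)).Pairwise (· < ·) := by
  rw [List.pairwise_map]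
  exact h.imp (by omega)

theorem pv_sortedSet_pairwise (xs : List Int) : (pvSortedSet xs).Pairwise (· < ·) :=
  PySem.List.sorted_ofList_pairwise_lt xs

theorem pv_sortedSet_ne_nil (xs : List Int) (h : xs ≠ []) : pvSortedSet xs ≠ [] := by
  intro hc
  rw [pvSortedSet, PySem.List.sorted_eq_nil_iff] at hc
  obtain ⟨y, hy⟩ := List.exists_mem_of_ne_nil xs h
  have := (PySem.Set.mem_ofList xs y).mpr hy
  simp [hc] at this

-- a whole-chord shift of a strictly sorted chord needs no re-sorting / dedup
theorem pv_collapse (v : List Int) (c : Int) (h : v.Pairwise (· < ·)) :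
    pvSortedSet (v.map (fun n => n + c)) = v.map (fun n => n + c) := by
  have hpw := pv_pairwise_map v c h
  have hnd : (v.map (fun n => n + c)).Nodup := hpw.imp (fun h => by omega)
  rw [pvSortedSet, PySem.Set.ofList_eq_self_of_nodup _ hnd]
  exact PySem.List.sorted_eq_of_perm_of_pairwise_lt _ _ _ (List.Perm.refl _) hpw

theorem pv_foldl_min (t : List Int) (x : Int) (h : ∀ y ∈ t, x ≤ y) :
    t.foldl min x = x := by
  induction t generalizing x with
  | nil => rfl
  | cons y t ih =>
      have hx : min x y = x := min_eq_left (h y (by simp))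
      simp only [List.foldl_cons, hx]
      exact ih x (fun z hz => h z (by simp [hz]))

theorem pv_min_cons (x : Int) (t : List Int) (h : (x :: t).Pairwise (· < ·)) :
    pvMin (x :: t) = x := by
  rw [pvMin, PySem.List.min?_id_cons]
  have : ∀ y ∈ t, x ≤ y := fun y hy => le_of_lt ((List.pairwise_cons.mp h).1 y hy)
  simp [pv_foldl_min t x this]

theorem pv_foldl_max (t : List Int) (x : Int) (h : (x :: t).Pairwise (· ≤ ·)) :
    t.foldl max x = pvLast (x :: t) := by
  induction t generalizing x with
  | nil => rfl
  | cons y t ih =>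
      have hxy : x ≤ y := (List.pairwise_cons.mp h).1 y (by simp)
      simp only [List.foldl_cons, max_eq_right hxy]
      rw [ih y (List.pairwise_cons.mp h).2]
      simp [pvLast]
  
theorem pv_max_cons (x : Int) (t : List Int) (h : (x :: t).Pairwise (· < ·)) :
    pvMax (x :: t) = pvLast (x :: t) := by
  rw [pvMax, PySem.List.max?_id_cons]
  rw [pv_foldl_max t x (h.imp le_of_lt)]
  rfl

theorem pv_last_map (v : List Int) (c : Int) (h : v ≠ []) :
    pvLast (v.map (fun n => n + c)) = pvLast v + c := by
  rw [pvLast, pvLast, List.getLast?_map]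
  obtain ⟨y, hy⟩ := List.getLast?_isSome.mpr h |> Option.isSome_iff_exists.mp
  simp [hy]

theorem pv_get0 (x : Int) (t : List Int) :
    (PySem.List.pyGet? (x :: t) 0).getD 0 = x := by
  simp [PySem.List.pyGet?, PySem.List.pyIdx?]

theorem pv_getNeg1 (v : List Int) (h : v ≠ []) :
    (PySem.List.pyGet? v (-1)).getD 0 = pvLast v := by
  have hl : 1 ≤ v.length := List.length_pos_iff.mpr h
  simp only [PySem.List.pyGet?, PySem.List.pyIdx?]
  rw [if_neg (by omega), if_pos (by omega)]
  simp only [Option.bind_some]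
  rw [pvLast, List.getLast?_eq_getElem?]
  norm_num

-- closed form of A's capped push-up loop
theorem pv_loopUp_eq (f : Nat) (x : Int) (t : List Int) (h : (x :: t).Pairwise (· < ·)) :
    pvLoopUpA f (x :: t) = (x :: t).map (fun n => n + 12 * pvUpAmt f x) := by
  induction f generalizing x t with
  | zero =>
      have : pvUpAmt 0 x = 0 := by unfold pvUpAmt; split <;> omega
      simp [pvLoopUpA, this]
  | succ f ih =>
      rw [pvLoopUpA, pv_min_cons x t h]
      by_cases hx : 40 ≤ x
      · rw [if_pos hx]
        have : pvUpAmt (f + 1) x = 0 := by unfold pvUpAmt; split <;> omega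
        simp [this]
      · rw [if_neg hx]
        have hc : pvSortedSet (pvShiftOctaves (x :: t) 1) =
            (x :: t).map (fun n => n + 12) := by
          have := pv_collapse (x :: t) 12 h
          simpa [pvShiftOctaves] using this
        rw [hc]
        have hp : ((x + 12) :: t.map (fun n => n + 12)).Pairwise (· < ·) := by
          simpa using pv_pairwise_map (x :: t) 12 h
        have := ih (x + 12) (t.map (fun n => n + 12)) hp
        simp only [List.map_cons] at this ⊢
        rw [this, List.map_map]
        have hamt : pvUpAmt f (x + 12) + 1 = pvUpAmt (f + 1) x := by
          unfold pvUpAmt; split <;> split <;> push_cast <;> omega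
        refine List.cons_eq_cons.mpr ⟨by omega, ?_⟩
        apply List.map_congr_left; intro a _; simp only [Function.comp_apply]; omega

-- closed form of A's capped bass pull-down loop
theorem pv_loopDown_eq (f : Nat) (x : Int) (t : List Int) (h : (x :: t).Pairwise (· < ·))
    (hx : 40 ≤ x) :
    pvLoopDownBassA f (x :: t) = (x :: t).map (fun n => n + 12 * pvDownAmt f x) := by
  induction f generalizing x t with
  | zero =>
      have : pvDownAmt 0 x = 0 := by unfold pvDownAmt; split <;> omega
      simp [pvLoopDownBassA, this]
  | succ f ih =>
      rw [pvLoopDownBassA, pv_min_cons x t h]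
      by_cases hx52 : x ≤ 52
      · rw [if_pos hx52]
        have : pvDownAmt (f + 1) x = 0 := by unfold pvDownAmt; split <;> omega
        simp [this]
      · rw [if_neg hx52]
        have hc : pvSortedSet (pvShiftOctaves (x :: t) (-1)) =
            (x :: t).map (fun n => n + (-12)) := by
          have := pv_collapse (x :: t) (-12) h
          simpa [pvShiftOctaves] using this
        simp only [hc, List.map_cons]
        have hp : ((x + (-12)) :: t.map (fun n => n + (-12))).Pairwise (· < ·) := by
          simpa using pv_pairwise_map (x :: t) (-12) h
        rw [pv_min_cons _ _ hp, if_pos (by omega)]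
        have := ih (x + (-12)) (t.map (fun n => n + (-12))) hp (by omega)
        simp only [List.map_cons] at this ⊢
        rw [this, List.map_map]
        have hamt : pvDownAmt f (x + (-12)) - 1 = pvDownAmt (f + 1) x := by
          unfold pvDownAmt; split <;> split <;> push_cast <;> omega
        refine List.cons_eq_cons.mpr ⟨by omega, ?_⟩
        apply List.map_congr_left; intro a _; simp only [Function.comp_apply]; omega

-- closed form of A's capped ceiling loop
theorem pv_loopCeil_eq (f : Nat) (x : Int) (t : List Int) (h : (x :: t).Pairwise (· < ·))
    (hx : 40 ≤ x) :
    pvLoopCeilA f (x :: t) =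
      (x :: t).map (fun n => n + 12 * pvCeilAmt f x (pvLast (x :: t))) := by
  induction f generalizing x t with
  | zero =>
      have hz : x ≤ pvLast (x :: t) := by
        have := pv_max_cons x t h
        rw [pvMax, PySem.List.max?_id_cons] at this
        simp only [Option.getD_some] at this
        rw [← this]
        exact (PySem.List.le_foldl_max t x).1
      have : pvCeilAmt 0 x (pvLast (x :: t)) = 0 := by unfold pvCeilAmt; split <;> omega
      simp [pvLoopCeilA, this]
  | succ f ih =>
      have hz : x ≤ pvLast (x :: t) := by
        have := pv_max_cons x t h
        rw [pvMax, PySem.List.max?_id_cons] at this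
        simp only [Option.getD_some] at this
        rw [← this]
        exact (PySem.List.le_foldl_max t x).1
      rw [pvLoopCeilA, pv_max_cons x t h]
      by_cases h88 : pvLast (x :: t) ≤ 88
      · rw [if_pos h88]
        have : pvCeilAmt (f + 1) x (pvLast (x :: t)) = 0 := by
          unfold pvCeilAmt; split <;> omega
        simp [this]
      · rw [if_neg h88]
        have hc : pvSortedSet (pvShiftOctaves (x :: t) (-1)) =
            (x :: t).map (fun n => n + (-12)) := by
          have := pv_collapse (x :: t) (-12) h
          simpa [pvShiftOctaves] using this
        simp only [hc, List.map_cons]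
        have hp : ((x + (-12)) :: t.map (fun n => n + (-12))).Pairwise (· < ·) := by
          simpa using pv_pairwise_map (x :: t) (-12) h
        rw [pv_min_cons _ _ hp]
        by_cases h40 : x + (-12) < 40
        · rw [if_pos h40]
          have : pvCeilAmt (f + 1) x (pvLast (x :: t)) = 0 := by
            unfold pvCeilAmt; split <;> omega
          simp [this]
        · rw [if_neg h40]
          have := ih (x + (-12)) (t.map (fun n => n + (-12))) hp (by omega)
          simp only [List.map_cons] at this ⊢
          rw [this, List.map_map]
          have hlast : pvLast ((x + (-12)) :: t.map (fun n => n + (-12))) =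
              pvLast (x :: t) + (-12) := by
            have := pv_last_map (x :: t) (-12) (by simp)
            simpa using this
          rw [hlast]
          have hamt : pvCeilAmt f (x + (-12)) (pvLast (x :: t) + (-12)) - 1 =
              pvCeilAmt (f + 1) x (pvLast (x :: t)) := by
            unfold pvCeilAmt; split <;> split <;> push_cast <;> omega
          refine List.cons_eq_cons.mpr ⟨by omega, ?_⟩
          apply List.map_congr_left; intro a _; simp only [Function.comp_apply]; omega

-- the per-note while-bump equals the arithmetic bump
theorem pv_bump_eq (n : Int) : pvBumpA n = pvBumpB n := by
  rw [pvBumpA]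
  split
  · rename_i h
    rw [pv_bump_eq (n + 12)]
    simp only [pvBumpB, pv_fd12, if_pos h]
    by_cases h2 : n + 12 < 40
    · rw [if_pos h2]; omega
    · rw [if_neg h2]; omega
  · rename_i h
    simp [pvBumpB, h]
termination_by (40 - n).toNat
decreasing_by omega

theorem pv_bumpB_ge (n : Int) : 40 ≤ pvBumpB n := by
  rw [pvBumpB, pv_fd12]
  split <;> omega

-- the common tail of both programs, from the point where the chord starts at or above the floor
def pvTailA (v : List Int) : List Int :=
  let v3 := pvLoopUpA 6 v
  let v4 := pvLoopDownBassA 6 v3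
  let v5 := pvLoopCeilA 6 v4
  let v6 := pvLoopUpA 6 v5
  if pvMin v6 < 40 then pvClampA v6 else v6

def pvTailB (v : List Int) : List Int :=
  let lo := (PySem.List.pyGet? v 0).getD 0
  let hi := (PySem.List.pyGet? v (-1)).getD 0
  let d := if 52 < lo then min (PySem.Int.floordiv (lo - 53) 12 + 1) 6 else 0
  let v3 := v.map (fun n => n - 12 * d)
  let lo2 := lo - 12 * d
  let hi2 := hi - 12 * d
  let c := if 88 < hi2 then
      min (min (PySem.Int.floordiv (hi2 - 89) 12 + 1) (PySem.Int.floordiv (lo2 - 40) 12)) 6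
    else 0
  v3.map (fun n => n - 12 * c)

theorem pv_tail (x2 : Int) (t2 : List Int) (h : (x2 :: t2).Pairwise (· < ·)) (hx2 : 40 ≤ x2) :
    pvTailA (x2 :: t2) = pvTailB (x2 :: t2) := by
  dsimp only [pvTailA, pvTailB]
  have h2 : pvLoopUpA 6 (x2 :: t2) = x2 :: t2 := by
    rw [pv_loopUp_eq 6 x2 t2 h]
    have h0 : pvUpAmt 6 x2 = 0 := by unfold pvUpAmt; split <;> omega
    simp [h0]
  rw [h2, pv_loopDown_eq 6 x2 t2 h hx2]
  rw [pv_get0, pv_getNeg1 _ (List.cons_ne_nil _ _)]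
  set z := pvLast (x2 :: t2) with hzdef
  set cD := 12 * pvDownAmt 6 x2 with hcD
  set dB : Int := (if 52 < x2 then min (PySem.Int.floordiv (x2 - 53) 12 + 1) 6 else 0) with hdB
  have hD : cD = -(12 * dB) := by
    rw [hcD, hdB]
    unfold pvDownAmt
    rw [pv_fd12]
    by_cases h52 : 52 < x2
    · rw [if_pos h52, if_pos h52]; push_cast; omega
    · rw [if_neg h52, if_neg h52]; ring
  simp only [List.map_cons]
  have hp3 : ((x2 + cD) :: t2.map (fun n => n + cD)).Pairwise (· < ·) := by
    simpa using pv_pairwise_map (x2 :: t2) cD h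
  have hx3 : 40 ≤ x2 + cD := by
    rw [hcD]; unfold pvDownAmt; split <;> push_cast <;> omega
  rw [pv_loopCeil_eq 6 (x2 + cD) (t2.map (fun n => n + cD)) hp3 hx3]
  have hlast3 : pvLast ((x2 + cD) :: t2.map (fun n => n + cD)) = z + cD := by
    simpa [hzdef] using pv_last_map (x2 :: t2) cD (List.cons_ne_nil _ _)
  rw [hlast3]
  set cC := 12 * pvCeilAmt 6 (x2 + cD) (z + cD) with hcC
  simp only [List.map_cons]
  have hp4 : ((x2 + cD + cC) :: (t2.map (fun n => n + cD)).map (fun n => n + cC)).Pairwise (· < ·) := by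
    simpa using pv_pairwise_map ((x2 + cD) :: t2.map (fun n => n + cD)) cC hp3
  have hx4 : 40 ≤ x2 + cD + cC := by
    rw [hcC]; unfold pvCeilAmt; split <;> push_cast <;> omega
  rw [pv_loopUp_eq 6 (x2 + cD + cC) _ hp4]
  have h50 : pvUpAmt 6 (x2 + cD + cC) = 0 := by unfold pvUpAmt; split <;> omega
  rw [h50]
  simp only [mul_zero, add_zero, List.map_id']
  rw [pv_min_cons _ _ hp4, if_neg (by omega)]
  set cB : Int := (if 88 < z - 12 * dB then
      min (min (PySem.Int.floordiv (z - 12 * dB - 89) 12 + 1)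
        (PySem.Int.floordiv (x2 - 12 * dB - 40) 12)) 6 else 0) with hcB
  have hC : cC = -(12 * cB) := by
    rw [hcB, show z - 12 * dB = z + cD by omega, show x2 - 12 * dB = x2 + cD by omega, hcC]
    unfold pvCeilAmt
    rw [pv_fd12, pv_fd12]
    by_cases h88 : 88 < z + cD
    · rw [if_pos h88, if_pos h88]; push_cast; omega
    · rw [if_neg h88, if_neg h88]; ring
  refine List.cons_eq_cons.mpr ⟨by omega, ?_⟩
  rw [List.map_map, List.map_map]
  apply List.map_congr_left
  intro a _
  simp only [Function.comp_apply]
  omega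

-- ===== VERDICT (by name: the statement is the Claim_ definition above) =====
theorem enforce_register_py_spec : Claim_equal_enforce_register_py := by
  intro notes _
  unfold Spec_enforce_register_py
  by_cases hn : notes = []
  · simp [hn, enforce_register_py, enforce_register_py_alt]
  · obtain ⟨x, t, hs⟩ : ∃ x t, pvSortedSet notes = x :: t := by
      cases hv : pvSortedSet notes with
      | nil => exact absurd hv (pv_sortedSet_ne_nil notes hn)
      | cons a b => exact ⟨a, b, rfl⟩
    have hpw : (x :: t).Pairwise (· < ·) := hs ▸ pv_sortedSet_pairwise notes
    show (if notes = [] then [] else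
        pvTailA (if pvMin (pvLoopUpA 6 (pvSortedSet notes)) < 40
          then pvClampA (pvLoopUpA 6 (pvSortedSet notes))
          else pvLoopUpA 6 (pvSortedSet notes)))
      = (if notes = [] then [] else
        pvTailB (if (PySem.List.pyGet? ((pvSortedSet notes).map (fun n => n + 12 *
              (if (PySem.List.pyGet? (pvSortedSet notes) 0).getD 0 < 40
               then min (PySem.Int.floordiv (40 - (PySem.List.pyGet? (pvSortedSet notes) 0).getD 0 + 11) 12) 6
               else 0))) 0).getD 0 < 40
          then pvSortedSet (((pvSortedSet notes).map (fun n => n + 12 *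
              (if (PySem.List.pyGet? (pvSortedSet notes) 0).getD 0 < 40
               then min (PySem.Int.floordiv (40 - (PySem.List.pyGet? (pvSortedSet notes) 0).getD 0 + 11) 12) 6
               else 0))).map pvBumpB)
          else (pvSortedSet notes).map (fun n => n + 12 *
              (if (PySem.List.pyGet? (pvSortedSet notes) 0).getD 0 < 40
               then min (PySem.Int.floordiv (40 - (PySem.List.pyGet? (pvSortedSet notes) 0).getD 0 + 11) 12) 6
               else 0))))
    rw [if_neg hn, if_neg hn, hs, pv_get0]
    have hk : (if x < 40 then min (PySem.Int.floordiv (40 - x + 11) 12) 6 else 0) = pvUpAmt 6 x := by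
      unfold pvUpAmt; rw [pv_fd12]; norm_num
    rw [hk, pv_loopUp_eq 6 x t hpw]
    set u := pvUpAmt 6 x with hu
    simp only [List.map_cons]
    have hp1 : ((x + 12 * u) :: t.map (fun n => n + 12 * u)).Pairwise (· < ·) := by
      simpa using pv_pairwise_map (x :: t) (12 * u) hpw
    rw [pv_min_cons _ _ hp1, pv_get0]
    by_cases hcl : x + 12 * u < 40
    · rw [if_pos hcl, if_pos hcl]
      have hclampeq : pvClampA ((x + 12 * u) :: t.map (fun n => n + 12 * u)) =
          pvSortedSet (pvBumpB (x + 12 * u) :: (t.map (fun n => n + 12 * u)).map pvBumpB) := by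
        unfold pvClampA
        simp only [List.map_cons]
        rw [pv_bump_eq, List.map_congr_left (fun a _ => pv_bump_eq a)]
      rw [hclampeq]
      obtain ⟨x2, t2, hv2⟩ : ∃ x2 t2,
          pvSortedSet (pvBumpB (x + 12 * u) :: (t.map (fun n => n + 12 * u)).map pvBumpB) = x2 :: t2 := by
        cases hv : pvSortedSet (pvBumpB (x + 12 * u) :: (t.map (fun n => n + 12 * u)).map pvBumpB) with
        | nil => exact absurd hv (pv_sortedSet_ne_nil _ (by simp))
        | cons a b => exact ⟨a, b, rfl⟩
      rw [hv2]
      refine pv_tail x2 t2 (hv2 ▸ pv_sortedSet_pairwise _) ?_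
      have hx2 : x2 ∈ pvSortedSet (pvBumpB (x + 12 * u) :: (t.map (fun n => n + 12 * u)).map pvBumpB) := by
        rw [hv2]; simp
      rw [pvSortedSet, PySem.List.mem_sorted, PySem.Set.mem_ofList] at hx2
      rcases List.mem_cons.mp hx2 with h1 | h1
      · rw [h1]; exact pv_bumpB_ge _
      · obtain ⟨y, _, hy⟩ := List.mem_map.mp h1
        rw [← hy]; exact pv_bumpB_ge y
    · rw [if_neg hcl, if_neg hcl]
      exact pv_tail (x + 12 * u) _ hp1 (by omega)
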